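-- pv_equiv track=rewrite | github.com/ducdh-dev/python_quiz | python_quiz/higer_order_think/decorator.py | merging_arr
-- ===== SOURCE A (Python) =====
-- def merging_arr(arr, n):
--     def n_times(n):
--         def func_decor(func):
--             def func_wrapper(arr):
--                 for _ in range(n):
--                     arr = func(arr)
--                 return arr
--
--             return func_wrapper
--
--         return func_decor
--
--     @n_times(n)
--     def sum_once(arr):
--         res = [arr[i] + arr[i + 1] for i in range(0, len(arr) - 1, 2)]
--         if len(arr) % 2 == 1:
--             res.append(arr[-1])
--         return res
--
--     return sum_once(arr)
-- ===== SOURCE B (Python) =====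
-- def merging_arr(arr, n):
--     # Prefix sums once; then decimate block boundaries n times (stopping once a
--     # single block remains) and read each block's sum from the prefix table.
--     P = [0]
--     for x in arr:
--         P.append(P[-1] + x)
--     bs = list(range(len(arr) + 1))
--     for _ in range(n):
--         if len(bs) <= 2:
--             break
--         nb = [bs[i] for i in range(0, len(bs), 2)]
--         if len(bs) % 2 == 0:
--             nb.append(bs[-1])
--         bs = nb
--     return [P[b] - P[a] for a, b in zip(bs, bs[1:])]
-- ===== Notes on version B (the rewrite author's own statement) =====
-- stated objective: alternative
-- what changed: Instead of re-scanning and re-adding adjacent values in each of the n passes, B builds one prefix-sum table, decimates the block-boundary index list n times (stopping early once a single block remains), and emits each surviving block as a difference of two prefix sums.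
import Mathlib
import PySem

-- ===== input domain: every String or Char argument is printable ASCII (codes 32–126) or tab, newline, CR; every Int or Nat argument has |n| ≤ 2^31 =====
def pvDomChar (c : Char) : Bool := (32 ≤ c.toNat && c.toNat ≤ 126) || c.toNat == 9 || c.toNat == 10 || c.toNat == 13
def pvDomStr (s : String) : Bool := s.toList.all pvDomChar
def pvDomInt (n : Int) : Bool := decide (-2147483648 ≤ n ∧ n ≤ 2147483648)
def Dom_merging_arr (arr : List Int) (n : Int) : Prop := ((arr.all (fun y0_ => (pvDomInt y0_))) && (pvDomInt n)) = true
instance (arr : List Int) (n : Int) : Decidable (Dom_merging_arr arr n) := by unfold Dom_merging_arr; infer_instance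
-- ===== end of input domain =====

-- B replaces A's n repeated pairwise re-summation passes by one prefix-sum table plus n
-- decimations of the block-boundary index list (stopping once one block remains); alternative
-- decomposition, and it avoids re-adding element values at every pass.

-- ===== PORT A =====
-- sum_once: res = [arr[i] + arr[i+1] for i in range(0, len(arr)-1, 2)]; append arr[-1] if odd length
def sumOnceA (arr : List Int) : List Int :=
  let res := (PySem.List.pyRange 0 ((arr.length : Int) - 1) 2).map
    (fun i => PySem.List.pyGetD arr i 0 + PySem.List.pyGetD arr (i + 1) 0)
  if arr.length % 2 = 1 then res ++ [PySem.List.pyGetD arr (-1) 0] else res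

-- func_wrapper: for _ in range(n): arr = sum_once(arr)
def merging_arr (arr : List Int) (n : Int) : List Int :=
  (PySem.List.pyRange 0 n 1).foldl (fun a _ => sumOnceA a) arr

-- ===== PORT B =====
-- nb = [bs[i] for i in range(0, len(bs), 2)]; if len(bs) % 2 == 0: nb.append(bs[-1])
def decimateB (bs : List Int) : List Int :=
  let nb := (PySem.List.pyRange 0 (bs.length : Int) 2).map (fun i => PySem.List.pyGetD bs i 0)
  if bs.length % 2 = 0 then nb ++ [PySem.List.pyGetD bs (-1) 0] else nb

-- for _ in range(n): if len(bs) <= 2: break; bs = decimate(bs)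
def loopB : Nat → List Int → List Int
  | 0, bs => bs
  | Nat.succ k, bs => if bs.length ≤ 2 then bs else loopB k (decimateB bs)

def merging_arr_alt (arr : List Int) (n : Int) : List Int :=
  let P := arr.foldl (fun P x => P ++ [PySem.List.pyGetD P (-1) 0 + x]) [0]
  let bs0 := PySem.List.pyRange 0 ((arr.length : Int) + 1) 1
  let bs := loopB n.toNat bs0
  (bs.zip (PySem.List.slice bs (some 1) none)).map
    (fun p => PySem.List.pyGetD P p.2 0 - PySem.List.pyGetD P p.1 0)

-- ===== PRECONDITION & SPEC =====
def Spec_merging_arr (arr : List Int) (n : Int) (out : List Int) : Prop := out = merging_arr_alt arr n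
instance (arr : List Int) (n : Int) (out : List Int) : Decidable (Spec_merging_arr arr n out) := by unfold Spec_merging_arr; infer_instance

-- ===== CLAIM (what is proved, stated in full; the proofs are below) =====
def Claim_equal_merging_arr : Prop := ∀ (arr : List Int) (n : Int), Dom_merging_arr arr n → Spec_merging_arr arr n (merging_arr arr n)

-- ===== LEMMAS AND PROOFS =====


theorem pyRange_two_nil {a b : Int} (h : b ≤ a) : PySem.List.pyRange a b 2 = [] := by
  rw [PySem.List.pyRange_of_pos _ _ (by norm_num : (0:Int) < 2), if_neg (by omega)]
  rfl

theorem pyGetD_cons2 (a b : Int) (t : List Int) (i : Int) (h : 0 ≤ i) :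
    PySem.List.pyGetD (a :: b :: t) (i + 2) 0 = PySem.List.pyGetD t i 0 := by
  obtain ⟨k, rfl⟩ := Int.eq_ofNat_of_zero_le h
  have : (k : Int) + 2 = ((k + 2 : Nat) : Int) := by push_cast; ring
  rw [this, PySem.List.pyGetD_natCast, PySem.List.pyGetD_natCast]
  simp [List.getD]

theorem pyRange_two_shift (a b : Int) :
    PySem.List.pyRange (a + 2) b 2 = (PySem.List.pyRange a (b - 2) 2).map (· + 2) := by
  rw [PySem.List.pyRange_of_pos _ _ (by norm_num), PySem.List.pyRange_of_pos _ _ (by norm_num),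
    List.map_map]
  have hc : (if a + 2 < b then ((b - (a + 2) + 2 - 1) / 2).toNat else 0)
      = (if a < b - 2 then ((b - 2 - a + 2 - 1) / 2).toNat else 0) := by
    by_cases h : a + 2 < b
    · rw [if_pos h, if_pos (by omega)]; congr 1; omega
    · rw [if_neg h, if_neg (by omega)]
  rw [hc]
  exact List.map_congr_left (fun k _ => by simp; ring)

theorem pyRange_two_cons {a b : Int} (h : a < b) :
    PySem.List.pyRange a b 2 = a :: PySem.List.pyRange (a + 2) b 2 := by
  rw [PySem.List.pyRange_of_pos _ _ (by norm_num : (0:Int) < 2),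
      PySem.List.pyRange_of_pos _ _ (by norm_num : (0:Int) < 2)]
  have hc1 : (if a < b then ((b - a + 2 - 1) / 2).toNat else 0)
      = (if a + 2 < b then ((b - (a + 2) + 2 - 1) / 2).toNat else 0) + 1 := by
    rw [if_pos h]
    by_cases h2 : a + 2 < b
    · rw [if_pos h2]; omega
    · rw [if_neg h2]; omega
  rw [hc1, List.range_succ_eq_map, List.map_cons, List.map_map]
  congr 1
  · simp
  · exact List.map_congr_left (fun k _ => by simp [Nat.succ_eq_add_one]; ring)

theorem pyRange_two_from2 (b : Int) :
    PySem.List.pyRange 2 b 2 = (PySem.List.pyRange 0 (b - 2) 2).map (· + 2) := by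
  have h := pyRange_two_shift 0 b
  norm_num at h
  exact h

theorem pairs_map_eq : ∀ (g : Int → Int → Int) (xs : List Int),
    (PySem.List.pyRange 0 ((xs.length : Int) - 1) 2).map
      (fun i => g (PySem.List.pyGetD xs i 0) (PySem.List.pyGetD xs (i + 1) 0))
    = (match xs with
       | [] => []
       | [_] => []
       | a :: b :: t => (g a b) :: (PySem.List.pyRange 0 ((t.length : Int) - 1) 2).map
          (fun i => g (PySem.List.pyGetD t i 0) (PySem.List.pyGetD t (i + 1) 0))) := by
  intro g xs
  match xs with
  | [] => rw [pyRange_two_nil (by simp)]; rfl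
  | [x] => rw [pyRange_two_nil (by simp)]; rfl
  | a :: b :: t =>
    have hb : (0:Int) < ((a :: b :: t).length : Int) - 1 := by simp only [List.length_cons]; push_cast; omega
    rw [pyRange_two_cons hb]
    rw [List.map_cons, (by ring : (0:Int) + 2 = 2), pyRange_two_from2, List.map_map]
    congr 1
    · rw [PySem.List.pyGetD_zero_cons, (by norm_num : (0:Int) + 1 = ((1:Nat):Int)),
        PySem.List.pyGetD_natCast]
      rfl
    · have hlen : ((a :: b :: t).length : Int) - 1 - 2 = ((t.length : Int)) - 1 := by
        simp; omega
      rw [hlen]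
      refine List.map_congr_left (fun i hi => ?_)
      have h0i : 0 ≤ i := ((PySem.List.mem_pyRange_iff_of_pos (by norm_num) i).mp hi).1
      simp only [Function.comp]
      rw [pyGetD_cons2 a b t i h0i]
      have : i + 2 + 1 = (i + 1) + 2 := by ring
      rw [this, pyGetD_cons2 a b t (i+1) (by omega)]

theorem es_map_eq : ∀ (bs : List Int),
    (PySem.List.pyRange 0 (bs.length : Int) 2).map (fun i => PySem.List.pyGetD bs i 0)
    = (match bs with
       | [] => []
       | [a] => [a]
       | a :: _ :: t => a :: (PySem.List.pyRange 0 (t.length : Int) 2).map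
          (fun i => PySem.List.pyGetD t i 0)) := by
  intro bs
  match bs with
  | [] => rw [pyRange_two_nil (by simp)]; rfl
  | [x] =>
    rw [pyRange_two_cons (by simp), pyRange_two_nil (by norm_num)]
    simp [PySem.List.pyGetD_zero_cons]
  | a :: b :: t =>
    have hb : (0:Int) < ((a :: b :: t).length : Int) := by simp only [List.length_cons]; push_cast; omega
    rw [pyRange_two_cons hb]
    rw [List.map_cons, (by ring : (0:Int) + 2 = 2), pyRange_two_from2, List.map_map]
    congr 1
    · exact PySem.List.pyGetD_zero_cons a (b :: t) 0
    · have hlen : ((a :: b :: t).length : Int) - 2 = ((t.length : Int)) := by simp; omega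
      rw [hlen]
      refine List.map_congr_left (fun i hi => ?_)
      have h0i : 0 ≤ i := ((PySem.List.mem_pyRange_iff_of_pos (by norm_num) i).mp hi).1
      simp only [Function.comp]
      exact pyGetD_cons2 a b t i h0i


def pairSum : List Int → List Int
  | [] => []
  | [a] => [a]
  | a :: b :: t => (a + b) :: pairSum t

def dI : List Int → List Int
  | [] => []
  | [a] => [a]
  | [a, b] => [a, b]
  | a :: _ :: c :: t => a :: dI (c :: t)

def sc (a : Int) : List Int → List Int
  | [] => [a]
  | x :: t => a :: sc (a + x) t

def S (arr : List Int) (i : Int) : Int := (arr.take i.toNat).sum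

def bv (arr : List Int) (bs : List Int) : List Int :=
  (bs.zip bs.tail).map (fun p => S arr p.2 - S arr p.1)

theorem dI_fix : ∀ (bs : List Int), bs.length ≤ 2 → dI bs = bs
  | [], _ => rfl
  | [_], _ => rfl
  | [_, _], _ => rfl
  | _ :: _ :: _ :: _, h => by simp at h

theorem dI_cons : ∀ (a : Int) (t : List Int), ∃ t', dI (a :: t) = a :: t'
  | _, [] => ⟨[], rfl⟩
  | _, [b] => ⟨[b], rfl⟩
  | _, b :: c :: t => ⟨dI (c :: t), rfl⟩

theorem dI_subset : ∀ (bs : List Int) (x : Int), x ∈ dI bs → x ∈ bs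
  | [], x, h => h
  | [_], x, h => h
  | [_, _], x, h => h
  | a :: _b :: c :: t, x, h => by
    simp only [dI, List.mem_cons] at h ⊢
    rcases h with h | h
    · exact Or.inl h
    · have := dI_subset (c :: t) x h
      simp only [List.mem_cons] at this
      tauto

theorem dI_iter_subset : ∀ (k : Nat) (bs : List Int) (x : Int), x ∈ dI^[k] bs → x ∈ bs := by
  intro k
  induction k with
  | zero => intro bs x h; simpa using h
  | succ k ih =>
    intro bs x h
    rw [Function.iterate_succ_apply] at h
    exact dI_subset bs x (ih (dI bs) x h)

theorem pairSum_bv (arr : List Int) : ∀ bs : List Int, pairSum (bv arr bs) = bv arr (dI bs)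
  | [] => rfl
  | [a] => rfl
  | [a, b] => rfl
  | a :: b :: c :: t => by
    obtain ⟨t', ht⟩ := dI_cons c t
    have h1 : bv arr (a :: b :: c :: t) =
        (S arr b - S arr a) :: (S arr c - S arr b) :: bv arr (c :: t) := by
      simp [bv]
    have h2 : pairSum ((S arr b - S arr a) :: (S arr c - S arr b) :: bv arr (c :: t))
        = (S arr c - S arr a) :: pairSum (bv arr (c :: t)) := by
      simp [pairSum]
    rw [h1, h2, pairSum_bv arr (c :: t), show dI (a :: b :: c :: t) = a :: dI (c :: t) from rfl,
      ht]
    simp [bv]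

theorem foldl_apply_const {α β : Type} (f : α → α) : ∀ (l : List β) (x : α),
    l.foldl (fun a _ => f a) x = f^[l.length] x := by
  intro l
  induction l with
  | nil => intro x; rfl
  | cons y t ih =>
    intro x
    simp only [List.foldl_cons, List.length_cons, ih, Function.iterate_succ_apply]

theorem sc_getD : ∀ (xs : List Int) (a : Int) (k : Nat), k ≤ xs.length →
    (sc a xs).getD k 0 = a + (xs.take k).sum := by
  intro xs
  induction xs with
  | nil =>
    intro a k h
    have hk : k = 0 := by simpa using h
    subst hk; simp [sc]
  | cons x t ih =>
    intro a k h
    match k with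
    | 0 => simp [sc]
    | Nat.succ k =>
      simp only [sc, List.getD_cons_succ, List.take_succ_cons, List.sum_cons]
      rw [ih (a + x) k (by simpa using h)]
      ring

theorem sc_pyGetD (arr : List Int) (b : Int) (h0 : 0 ≤ b) (h1 : b ≤ (arr.length : Int)) :
    PySem.List.pyGetD (sc 0 arr) b 0 = S arr b := by
  obtain ⟨k, rfl⟩ := Int.eq_ofNat_of_zero_le h0
  rw [PySem.List.pyGetD_natCast, S, Int.toNat_natCast]
  rw [sc_getD arr 0 k (by exact_mod_cast h1)]
  ring

theorem sc_fold_aux : ∀ (xs Q : List Int) (a : Int),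
    xs.foldl (fun P x => P ++ [PySem.List.pyGetD P (-1) 0 + x]) (Q ++ [a]) = Q ++ sc a xs := by
  intro xs
  induction xs with
  | nil => intro Q a; rfl
  | cons x t ih =>
    intro Q a
    rw [List.foldl_cons, PySem.List.pyGetD_neg_one_append_singleton]
    rw [ih (Q ++ [a]) (a + x)]
    simp [sc]

theorem sc_fold (arr : List Int) :
    arr.foldl (fun P x => P ++ [PySem.List.pyGetD P (-1) 0 + x]) [0] = sc 0 arr := by
  have := sc_fold_aux arr [] 0
  simpa using this

theorem bv_init (arr : List Int) :
    bv arr (PySem.List.pyRange 0 ((arr.length : Int) + 1) 1) = arr := by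
  apply List.ext_getElem
  · simp [bv, PySem.List.length_pyRange_one]
  · intro i h1 h2
    have hlen : (PySem.List.pyRange 0 ((arr.length : Int) + 1) 1).length = arr.length + 1 := by
      rw [PySem.List.length_pyRange_one]; omega
    simp only [bv, List.getElem_map, List.getElem_zip]
    have hi1 : i < (PySem.List.pyRange 0 ((arr.length : Int) + 1) 1).length := by
      simp [bv, hlen] at h1 ⊢; omega
    have hi2 : i + 1 < (PySem.List.pyRange 0 ((arr.length : Int) + 1) 1).length := by
      simp [bv, hlen] at h1 ⊢; omega
    rw [List.getElem_tail]
    rw [PySem.List.getElem_pyRange_one, PySem.List.getElem_pyRange_one]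
    simp only [S, zero_add]
    simp only [Int.toNat_natCast]
    rw [List.sum_take_succ arr i h2]
    ring

def pairsW : List Int → List Int
  | [] => []
  | [_] => []
  | a :: b :: t => (a + b) :: pairsW t

def esW : List Int → List Int
  | [] => []
  | [a] => [a]
  | a :: _ :: t => a :: esW t

theorem pairsW_eq : ∀ xs : List Int,
    (PySem.List.pyRange 0 ((xs.length : Int) - 1) 2).map
      (fun i => PySem.List.pyGetD xs i 0 + PySem.List.pyGetD xs (i + 1) 0) = pairsW xs
  | [] => by rw [pairs_map_eq (fun x y => x + y) []]; rfl
  | [a] => by rw [pairs_map_eq (fun x y => x + y) [a]]; rfl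
  | a :: b :: t => by
    rw [pairs_map_eq (fun x y => x + y) (a :: b :: t)]
    show (a + b) :: _ = (a + b) :: pairsW t
    rw [pairsW_eq t]

theorem esW_eq : ∀ bs : List Int,
    (PySem.List.pyRange 0 (bs.length : Int) 2).map (fun i => PySem.List.pyGetD bs i 0) = esW bs
  | [] => by rw [es_map_eq []]; rfl
  | [a] => by rw [es_map_eq [a]]; rfl
  | a :: b :: t => by
    rw [es_map_eq (a :: b :: t)]
    show a :: _ = a :: esW t
    rw [esW_eq t]

theorem sumOnceA_if (xs : List Int) : sumOnceA xs =
    if xs.length % 2 = 1 then pairsW xs ++ [PySem.List.pyGetD xs (-1) 0] else pairsW xs := by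
  rw [← pairsW_eq xs]
  rfl

theorem decimateB_if (bs : List Int) : decimateB bs =
    if bs.length % 2 = 0 then esW bs ++ [PySem.List.pyGetD bs (-1) 0] else esW bs := by
  rw [← esW_eq bs]
  rfl

theorem pyGetD_last_shift2 (a b : Int) (t : List Int) (h : t ≠ []) :
    PySem.List.pyGetD (a :: b :: t) (-1) 0 = PySem.List.pyGetD t (-1) 0 := by
  rw [PySem.List.pyGetD_neg_one (a :: b :: t) 0 (by simp), PySem.List.pyGetD_neg_one t 0 h]
  simp [List.getLast_cons, h]

theorem sumOnceA_eq : ∀ xs : List Int, sumOnceA xs = pairSum xs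
  | [] => by decide
  | [a] => by
    rw [sumOnceA_if [a]]
    norm_num [pairsW, pairSum, PySem.List.pyGetD_neg_one]
  | a :: b :: t => by
    rw [sumOnceA_if (a :: b :: t)]
    have ht := sumOnceA_eq t
    rw [sumOnceA_if t] at ht
    have hpar : (a :: b :: t).length % 2 = t.length % 2 := by
      simp only [List.length_cons]; omega
    rw [hpar, show pairsW (a :: b :: t) = (a + b) :: pairsW t from rfl,
        show pairSum (a :: b :: t) = (a + b) :: pairSum t from rfl]
    by_cases hp : t.length % 2 = 1
    · have htne : t ≠ [] := by intro h; subst h; simp at hp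
      rw [if_pos hp] at ht ⊢
      rw [pyGetD_last_shift2 a b t htne, ← ht]
      simp
    · rw [if_neg hp] at ht ⊢
      rw [← ht]

theorem decimateB_eq : ∀ bs : List Int, bs ≠ [] → decimateB bs = dI bs
  | [], h => absurd rfl h
  | [a], _ => by
    rw [decimateB_if [a]]
    norm_num [esW, dI]
  | [a, b], _ => by
    rw [decimateB_if [a, b], PySem.List.pyGetD_neg_one [a, b] 0 (by simp)]
    norm_num [esW, dI, List.getLast]
  | a :: b :: c :: t, _ => by
    rw [decimateB_if (a :: b :: c :: t)]
    have ht := decimateB_eq (c :: t) (by simp)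
    rw [decimateB_if (c :: t)] at ht
    have hpar : (a :: b :: c :: t).length % 2 = (c :: t).length % 2 := by
      simp only [List.length_cons]; omega
    rw [hpar, show esW (a :: b :: c :: t) = a :: esW (c :: t) from rfl,
        show dI (a :: b :: c :: t) = a :: dI (c :: t) from rfl, ← ht,
        pyGetD_last_shift2 a b (c :: t) (by simp)]
    by_cases hp : (c :: t).length % 2 = 0
    · rw [if_pos hp, if_pos hp]; simp
    · rw [if_neg hp, if_neg hp]

theorem loopB_eq : ∀ (k : Nat) (bs : List Int), loopB k bs = dI^[k] bs := by
  intro k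
  induction k with
  | zero => intro bs; rfl
  | succ k ih =>
    intro bs
    show (if bs.length ≤ 2 then bs else loopB k (decimateB bs)) = dI^[k + 1] bs
    by_cases h : bs.length ≤ 2
    · rw [if_pos h, Function.iterate_fixed (dI_fix bs h)]
    · rw [if_neg h, decimateB_eq bs (by intro he; subst he; simp at h),
        Function.iterate_succ_apply, ih]

theorem iter_bv (arr : List Int) : ∀ (k : Nat) (bs : List Int),
    pairSum^[k] (bv arr bs) = bv arr (dI^[k] bs) := by
  intro k
  induction k with
  | zero => intro bs; rfl
  | succ k ih =>
    intro bs
    rw [Function.iterate_succ_apply, Function.iterate_succ_apply, pairSum_bv, ih]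

-- ===== VERDICT (by name: the statement is the Claim_ definition above) =====
theorem merging_arr_spec : Claim_equal_merging_arr := by
  intro arr n _
  unfold Spec_merging_arr
  simp only [merging_arr, merging_arr_alt]
  rw [sc_fold, loopB_eq, PySem.List.slice_from_one, foldl_apply_const sumOnceA,
      PySem.List.length_pyRange_one, funext sumOnceA_eq, show ((n : Int) - 0).toNat = n.toNat by omega]
  have hmap : ((dI^[n.toNat] (PySem.List.pyRange 0 ((arr.length : Int) + 1) 1)).zip
        (dI^[n.toNat] (PySem.List.pyRange 0 ((arr.length : Int) + 1) 1)).tail).map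
      (fun p => PySem.List.pyGetD (sc 0 arr) p.2 0 - PySem.List.pyGetD (sc 0 arr) p.1 0)
      = bv arr (dI^[n.toNat] (PySem.List.pyRange 0 ((arr.length : Int) + 1) 1)) := by
    unfold bv
    refine List.map_congr_left (fun p hp => ?_)
    obtain ⟨a, b⟩ := p
    obtain ⟨h1, h2⟩ := List.of_mem_zip hp
    have h2' : b ∈ dI^[n.toNat] (PySem.List.pyRange 0 ((arr.length : Int) + 1) 1) :=
      List.mem_of_mem_tail h2
    have ha := PySem.List.mem_pyRange_one.mp (dI_iter_subset _ _ _ h1)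
    have hb := PySem.List.mem_pyRange_one.mp (dI_iter_subset _ _ _ h2')
    simp only
    rw [sc_pyGetD arr b hb.1 (by omega), sc_pyGetD arr a ha.1 (by omega)]
  rw [hmap, ← iter_bv, bv_init]
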